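-- pv_equiv track=rewrite | github.com/leemeo3/algorithm | 프로그래머스/unrated/155652. 둘만의 암호/둘만의 암호.py | solution
-- ===== SOURCE A (Python) =====
-- def solution(s, skip, index):
--     answer = ''
--     sAscii = []     # s 리스트
--     skipAscii = []  # skip 리스트
--
--     for i in skip :
--         skipAscii.append(ord(i))    # skip 아스키코드로 변환
--
--     for i in s :
--         check = ord(i)              # check에 s를 하나씩 변환해 넣기
--         sAscii.clear()              # s 리스트 초기화
--         while len(sAscii) < index : # s 리스트 길이가 인덱스를 넘으면 종료
--             check += 1              # 한번 반복할때마다 +1 추가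
--
--             if check > 122 :        # Z를 넘어갈 경우 a로 바꾸기
--                 check = ord('a')
--
--             if check in skipAscii : # check가 스킵리스트에 있을경우 넘어감
--                 continue
--             else :
--                 sAscii.append(check) # 없다면 리스트에 추가
--         answer += chr(sAscii[index - 1]) # 리스트 제일 마지막 글자 answer
--
--     return answer
-- ===== SOURCE B (Python) =====
-- def solution(s, skip, index):
--     skipset = set(map(ord, skip))
--     cyc = [v for v in range(97, 123) if v not in skipset]
--     out = []
--     for ch in s:
--         c = ord(ch)
--         seg = [v for v in range(c + 1, 123) if v not in skipset]
--         if index <= len(seg):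
--             out.append(chr(seg[index - 1]))
--         else:
--             out.append(chr(cyc[(index - len(seg) - 1) % len(cyc)]))
--     return ''.join(out)
-- ===== Notes on version B (the rewrite author's own statement) =====
-- stated objective: faster
-- what changed: A advances each character one code at a time, rebuilding and scanning the skip list until `index` allowed codes have been collected (O(len(s)*index*len(skip))); B precomputes the skipped codes as a set and the allowed-letter cycle once, then finds each output character directly by indexing the remaining segment or the cycle with modular arithmetic (O(len(s)+len(skip))).
import Mathlib
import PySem

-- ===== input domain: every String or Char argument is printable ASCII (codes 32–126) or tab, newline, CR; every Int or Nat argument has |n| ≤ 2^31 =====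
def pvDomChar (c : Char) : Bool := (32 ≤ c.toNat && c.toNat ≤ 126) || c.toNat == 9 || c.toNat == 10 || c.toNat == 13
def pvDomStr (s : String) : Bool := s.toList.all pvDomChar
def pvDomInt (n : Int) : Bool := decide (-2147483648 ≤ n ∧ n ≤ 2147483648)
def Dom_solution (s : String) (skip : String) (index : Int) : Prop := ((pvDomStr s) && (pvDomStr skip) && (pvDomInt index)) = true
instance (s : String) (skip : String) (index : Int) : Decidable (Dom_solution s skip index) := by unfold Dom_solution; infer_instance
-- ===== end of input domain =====

-- B replaces A's per-character step-by-step simulation loop by a precomputed allowed-letter set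
-- and a direct segment/cycle lookup with modular arithmetic; the theorems state equality of the
-- RETURN value on Pre_solution (exactly the inputs on which Python A terminates normally).

-- ===== PORT A =====
-- the 'while len(sAscii) < index' loop; fuel only makes it total (proved sufficient on Pre_)
def solutionWhile : Nat → Int → List Int → Int → List Int → Int × List Int
  | 0, _, _, check, sAscii => (check, sAscii)
  | fuel + 1, index, skipAscii, check, sAscii =>
    if (sAscii.length : Int) < index then
      let check1 := check + 1
      let check2 := if check1 > 122 then 97 else check1
      if skipAscii.contains check2 then solutionWhile fuel index skipAscii check2 sAscii
      else solutionWhile fuel index skipAscii check2 (sAscii ++ [check2])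
    else (check, sAscii)

def solution (s : String) (skip : String) (index : Int) : String :=
  let skipAscii := skip.toList.map (fun i => (i.toNat : Int))
  s.toList.foldl (fun answer i =>
    let check := (i.toNat : Int)
    let res := solutionWhile (200 * (index.toNat + 1)) index skipAscii check []
    -- chr(sAscii[index - 1]); pyGet? is exact, the IndexError case (none) lies outside Pre_
    answer ++ String.ofList [Char.ofNat ((PySem.List.pyGet? res.2 (index - 1)).getD 0).toNat]) ""

-- ===== PORT B =====
def solution_alt (s : String) (skip : String) (index : Int) : String :=
  let skipset := PySem.Set.ofList (skip.toList.map (fun i => (i.toNat : Int)))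
  let cyc := (PySem.List.pyRange 97 123 1).filter (fun v => !(PySem.Set.contains skipset v))
  let out := s.toList.map (fun ch =>
    let c := (ch.toNat : Int)
    let seg := (PySem.List.pyRange (c + 1) 123 1).filter (fun v => !(PySem.Set.contains skipset v))
    if index ≤ (seg.length : Int) then
      String.ofList [Char.ofNat ((PySem.List.pyGet? seg (index - 1)).getD 0).toNat]
    else
      String.ofList [Char.ofNat ((PySem.List.pyGet? cyc (PySem.Int.mod (index - (seg.length : Int) - 1) (cyc.length : Int))).getD 0).toNat])
  PySem.Str.join "" out

-- ===== PRECONDITION & SPEC =====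
def pvSkipL (skip : String) : List Int := skip.toList.map (fun i => (i.toNat : Int))
def pvAllowed (skip : String) (v : Int) : Bool := !(pvSkipL skip).contains v
def pvSeg (skip : String) (c : Int) : List Int := (PySem.List.pyRange (c + 1) 123 1).filter (pvAllowed skip)
def pvCyc (skip : String) : List Int := (PySem.List.pyRange 97 123 1).filter (pvAllowed skip)

-- Pre_solution holds exactly where Python A returns: it excludes index < 1 with nonempty s (IndexError
-- 'sAscii[index - 1]' on the empty list) and the inputs where the while loop never terminates (every
-- letter 'a'..'z' skipped while index exceeds the allowed codes remaining up to 'z' for some character).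
def Pre_solution (s : String) (skip : String) (index : Int) : Prop :=
  s = "" ∨ (1 ≤ index ∧ (pvCyc skip ≠ [] ∨ ∀ ch ∈ s.toList, index ≤ ((pvSeg skip (ch.toNat : Int)).length : Int)))
instance (s : String) (skip : String) (index : Int) : Decidable (Pre_solution s skip index) := by
  unfold Pre_solution; infer_instance

def pvWitness_solution : String × String × Int := ("hello", "abc", 7)

def Spec_solution (s : String) (skip : String) (index : Int) (out : String) : Prop := out = solution_alt s skip index
instance (s : String) (skip : String) (index : Int) (out : String) : Decidable (Spec_solution s skip index out) := by
  unfold Spec_solution; infer_instance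

-- ===== CLAIM (what is proved, stated in full; the proofs are below) =====
def Claim_equal_solution : Prop := ∀ (s : String) (skip : String) (index : Int), Dom_solution s skip index → Pre_solution s skip index → Spec_solution s skip index (solution s skip index)

-- ===== LEMMAS AND PROOFS =====

-- the wrap-around successor 'check += 1; if check > 122: check = ord("a")'
def pvF (v : Int) : Int := if v + 1 > 122 then 97 else v + 1

-- the n-th (1-based) allowed code visited by the wrap-around walk starting after c, in closed form
def nthA (skip : String) (c : Int) (n : Nat) : Int :=
  if n ≤ (pvSeg skip c).length then (pvSeg skip c).getD (n - 1) 0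
  else (pvCyc skip).getD ((n - (pvSeg skip c).length - 1) % (pvCyc skip).length) 0

lemma pvSeg_nil (skip : String) (c : Int) (h : 122 ≤ c) : pvSeg skip c = [] := by
  unfold pvSeg
  rw [PySem.List.pyRange_one_eq_nil (by omega)]
  rfl

lemma pvSeg_cons (skip : String) (c : Int) (h : c < 122) :
    pvSeg skip c = (if pvAllowed skip (c + 1) then [c + 1] else []) ++ pvSeg skip (c + 1) := by
  unfold pvSeg
  rw [PySem.List.pyRange_one_cons (by omega), List.filter_cons]
  split_ifs <;> simp_all

lemma pvCyc_eq (skip : String) : pvCyc skip = pvSeg skip 96 := rfl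

lemma nth_skip (skip : String) (u : Int) (h : pvAllowed skip (pvF u) = false) :
    ∀ m : Nat, 1 ≤ m → nthA skip (pvF u) m = nthA skip u m := by
  intro m hm
  by_cases hlt : u < 122
  · have hf : pvF u = u + 1 := by unfold pvF; split_ifs <;> omega
    rw [hf] at h ⊢
    have hseg : pvSeg skip u = pvSeg skip (u + 1) := by
      rw [pvSeg_cons skip u hlt, h]; simp
    unfold nthA
    rw [hseg]
  · have hf : pvF u = 97 := by unfold pvF; split_ifs <;> omega
    rw [hf] at h ⊢
    have hsegu : pvSeg skip u = [] := pvSeg_nil skip u (by omega)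
    have hcyc : pvCyc skip = pvSeg skip 97 := by
      rw [pvCyc_eq, pvSeg_cons skip 96 (by omega)]
      norm_num [h]
    unfold nthA
    rw [hsegu, hcyc]
    simp only [List.length_nil, Nat.sub_zero]
    rw [if_neg (show ¬ (m ≤ 0) by omega)]
    by_cases hc : m ≤ (pvSeg skip 97).length
    · rw [if_pos hc, Nat.mod_eq_of_lt (show m - 1 < (pvSeg skip 97).length by omega)]
    · rw [if_neg hc]
      have harith : m - 1 = (m - (pvSeg skip 97).length - 1) + (pvSeg skip 97).length := by omega
      rw [harith, Nat.add_mod_right]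

lemma nth_take1 (skip : String) (u : Int) (h : pvAllowed skip (pvF u) = true) :
    nthA skip u 1 = pvF u := by
  by_cases hlt : u < 122
  · have hf : pvF u = u + 1 := by unfold pvF; split_ifs <;> omega
    rw [hf] at h ⊢
    have hseg : pvSeg skip u = (u + 1) :: pvSeg skip (u + 1) := by
      rw [pvSeg_cons skip u hlt, h]; simp
    unfold nthA
    rw [hseg]
    simp
  · have hf : pvF u = 97 := by unfold pvF; split_ifs <;> omega
    rw [hf] at h ⊢
    have hsegu : pvSeg skip u = [] := pvSeg_nil skip u (by omega)
    have hcyc : pvCyc skip = 97 :: pvSeg skip 97 := by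
      rw [pvCyc_eq, pvSeg_cons skip 96 (by omega)]
      norm_num [h]
    unfold nthA
    rw [hsegu, hcyc]
    simp

lemma nth_take (skip : String) (u : Int) (h : pvAllowed skip (pvF u) = true) :
    ∀ m : Nat, 1 ≤ m → nthA skip (pvF u) m = nthA skip u (m + 1) := by
  intro m hm
  by_cases hlt : u < 122
  · have hf : pvF u = u + 1 := by unfold pvF; split_ifs <;> omega
    rw [hf] at h ⊢
    have hseg : pvSeg skip u = (u + 1) :: pvSeg skip (u + 1) := by
      rw [pvSeg_cons skip u hlt, h]; simp
    unfold nthA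
    rw [hseg]
    simp only [List.length_cons]
    by_cases hc : m ≤ (pvSeg skip (u + 1)).length
    · rw [if_pos hc, if_pos (show m + 1 ≤ (pvSeg skip (u + 1)).length + 1 by omega)]
      have hmm : m + 1 - 1 = (m - 1) + 1 := by omega
      rw [hmm, List.getD_cons_succ]
    · rw [if_neg hc, if_neg (show ¬ (m + 1 ≤ (pvSeg skip (u + 1)).length + 1) by omega)]
      have harith : m + 1 - ((pvSeg skip (u + 1)).length + 1) - 1
          = m - (pvSeg skip (u + 1)).length - 1 := by omega
      rw [harith]
  · have hf : pvF u = 97 := by unfold pvF; split_ifs <;> omega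
    rw [hf] at h ⊢
    have hsegu : pvSeg skip u = [] := pvSeg_nil skip u (by omega)
    have hcyc : pvCyc skip = 97 :: pvSeg skip 97 := by
      rw [pvCyc_eq, pvSeg_cons skip 96 (by omega)]
      norm_num [h]
    unfold nthA
    rw [hsegu, hcyc]
    simp only [List.length_nil, List.length_cons, Nat.sub_zero]
    rw [if_neg (show ¬ (m + 1 ≤ 0) by omega)]
    have hL : m + 1 - 1 = m := by omega
    rw [hL]
    by_cases hc : m ≤ (pvSeg skip 97).length
    · rw [if_pos hc, Nat.mod_eq_of_lt (show m < (pvSeg skip 97).length + 1 by omega)]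
      have hmm : m = (m - 1) + 1 := by omega
      rw [hmm, List.getD_cons_succ]
      have hmm2 : m - 1 + 1 - 1 = m - 1 := by omega
      rw [hmm2]
    · rw [if_neg hc]
      have harith : m = (m - (pvSeg skip 97).length - 1) + ((pvSeg skip 97).length + 1) := by omega
      conv_rhs => rw [harith, Nat.add_mod_right]

lemma pvF_bounds (u : Int) (h : 0 ≤ u) : 0 ≤ pvF u ∧ pvF u ≤ 122 := by
  unfold pvF; split_ifs <;> omega

lemma iter_nonneg (k : Nat) (u : Int) (h : 0 ≤ u) : 0 ≤ pvF^[k] u := by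
  induction k generalizing u with
  | zero => simp [h]
  | succ k ih => rw [Function.iterate_succ_apply]; exact ih _ (pvF_bounds u h).1

lemma iter_below (k : Nat) (u : Int) (h : u + k ≤ 122) : pvF^[k] u = u + k := by
  induction k generalizing u with
  | zero => simp
  | succ k ih =>
    rw [Function.iterate_succ_apply]
    have hf : pvF u = u + 1 := by unfold pvF; split_ifs <;> push_cast at h ⊢ <;> omega
    rw [hf, ih _ (by push_cast at h ⊢; omega)]
    push_cast; ring

lemma reach (u w : Int) (hu0 : 0 ≤ u) (hw1 : 97 ≤ w) (hw2 : w ≤ 122) :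
    ∃ t : Nat, 1 ≤ t ∧ t ≤ 149 ∧ pvF^[t] u = w := by
  by_cases hcase : u < w
  · refine ⟨(w - u).toNat, by omega, by omega, ?_⟩
    rw [iter_below _ _ (by omega)]
    omega
  · have h97 : pvF 122 = 97 := by unfold pvF; norm_num
    by_cases hu2 : u ≤ 122
    · refine ⟨(w - 97).toNat + 1 + (122 - u).toNat, by omega, by omega, ?_⟩
      rw [Function.iterate_add_apply, iter_below (122 - u).toNat u (by omega)]
      have h122 : u + ((122 - u).toNat : Int) = 122 := by omega
      rw [h122, Function.iterate_succ_apply, h97, iter_below (w - 97).toNat 97 (by omega)]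
      omega
    · refine ⟨(w - 97).toNat + 1, by omega, by omega, ?_⟩
      rw [Function.iterate_succ_apply]
      have hfu : pvF u = 97 := by unfold pvF; split_ifs <;> omega
      rw [hfu, iter_below _ _ (by omega)]
      omega

-- the head of pvSeg is the first allowed code after c
lemma seg_first_aux (skip : String) : ∀ n : Nat, ∀ c : Int, (122 - c).toNat ≤ n → 0 ≤ c →
    ∀ w rest, pvSeg skip c = w :: rest →
    pvAllowed skip w = true ∧ c < w ∧ w ≤ 122 ∧ rest = pvSeg skip w ∧
      (∀ x : Int, c < x → x < w → pvAllowed skip x = false) := by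
  intro n
  induction n with
  | zero =>
    intro c hc h0 w rest hseg
    rw [pvSeg_nil skip c (by omega)] at hseg
    cases hseg
  | succ n ih =>
    intro c hc h0 w rest hseg
    by_cases hlt : c < 122
    · rw [pvSeg_cons skip c hlt] at hseg
      by_cases ha : pvAllowed skip (c + 1) = true
      · rw [if_pos ha] at hseg
        simp only [List.cons_append, List.cons.injEq] at hseg
        obtain ⟨hw, hrest⟩ := hseg
        subst hw
        exact ⟨ha, by omega, by omega, hrest.symm, fun x h1 h2 => by omega⟩
      · rw [if_neg ha, List.nil_append] at hseg
        obtain ⟨p1, p2, p3, p4, p5⟩ := ih (c + 1) (by omega) (by omega) w rest hseg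
        refine ⟨p1, by omega, p3, p4, fun x h1 h2 => ?_⟩
        by_cases hx : x = c + 1
        · subst hx
          exact Bool.not_eq_true _ ▸ (by simpa using ha)
        · exact p5 x (by omega) h2
    · rw [pvSeg_nil skip c (by omega)] at hseg
      cases hseg

lemma seg_first (skip : String) (c : Int) (h0 : 0 ≤ c) (w : Int) (rest : List Int)
    (h : pvSeg skip c = w :: rest) :
    pvAllowed skip w = true ∧ c < w ∧ w ≤ 122 ∧ rest = pvSeg skip w ∧
      (∀ x : Int, c < x → x < w → pvAllowed skip x = false) :=
  seg_first_aux skip (122 - c).toNat c le_rfl h0 w rest h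

lemma while_stop (fuel : Nat) (idx : Int) (L : List Int) (check : Int) (acc : List Int)
    (h : ¬ ((acc.length : Int) < idx)) : solutionWhile fuel idx L check acc = (check, acc) := by
  cases fuel with
  | zero => rw [solutionWhile]
  | succ n => rw [solutionWhile, if_neg h]

lemma while_step (fl : Nat) (idx : Int) (L : List Int) (check : Int) (acc : List Int)
    (h : (acc.length : Int) < idx) :
    solutionWhile (fl + 1) idx L check acc
      = if L.contains (pvF check) then solutionWhile fl idx L (pvF check) acc
        else solutionWhile fl idx L (pvF check) (acc ++ [pvF check]) := by
  rw [solutionWhile, if_pos h]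
  rfl

lemma adv (skip : String) (d : Nat) : ∀ (fl : Nat) (idx check : Int) (acc : List Int),
    (acc.length : Int) < idx →
    (∀ j : Nat, j < d → pvAllowed skip (pvF^[j + 1] check) = false) →
    pvAllowed skip (pvF^[d + 1] check) = true →
    solutionWhile (fl + (d + 1)) idx (pvSkipL skip) check acc
      = solutionWhile fl idx (pvSkipL skip) (pvF^[d + 1] check) (acc ++ [pvF^[d + 1] check]) := by
  induction d with
  | zero =>
    intro fl idx check acc hlt _ hall
    rw [Nat.zero_add] at hall ⊢
    rw [Function.iterate_one] at hall ⊢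
    have hcont : (pvSkipL skip).contains (pvF check) = false := by
      simpa [pvAllowed] using hall
    rw [while_step fl idx _ check acc hlt, hcont]
    simp
  | succ d ih =>
    intro fl idx check acc hlt hskip hall
    have h0 : pvAllowed skip (pvF^[1] check) = false := hskip 0 (by omega)
    rw [Function.iterate_one] at h0
    have hcont : (pvSkipL skip).contains (pvF check) = true := by
      simpa [pvAllowed] using h0
    have e : fl + (d + 1 + 1) = (fl + (d + 1)) + 1 := by omega
    rw [e, while_step _ idx _ check acc hlt, hcont]
    simp only [if_true]
    have hskip' : ∀ j : Nat, j < d → pvAllowed skip (pvF^[j + 1] (pvF check)) = false := by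
      intro j hj
      rw [← Function.iterate_succ_apply]
      exact hskip (j + 1) (by omega)
    have hall' : pvAllowed skip (pvF^[d + 1] (pvF check)) = true := by
      rw [← Function.iterate_succ_apply]
      exact hall
    rw [ih fl idx (pvF check) acc hlt hskip' hall']
    rw [← Function.iterate_succ_apply]

lemma main_loop (skip : String) (idx : Int) : ∀ (r : Nat) (check : Int) (acc : List Int) (fuel : Nat),
    200 * r ≤ fuel → idx = acc.length + r → 0 ≤ check → check ≤ 126 →
    (r ≤ (pvSeg skip check).length ∨ pvCyc skip ≠ []) →
    (solutionWhile fuel idx (pvSkipL skip) check acc).2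
      = acc ++ (List.range' 1 r).map (nthA skip check) := by
  intro r
  induction r with
  | zero =>
    intro check acc fuel _ hidx _ _ _
    rw [while_stop _ _ _ _ _ (by push_cast at hidx ⊢; omega)]
    simp
  | succ r ih =>
    intro check acc fuel hfuel hidx h0 h126 hside
    have hlt : (acc.length : Int) < idx := by push_cast at hidx ⊢; omega
    have key : ∃ t : Nat, 1 ≤ t ∧ t ≤ 149 ∧ pvAllowed skip (pvF^[t] check) = true ∧
        (pvCyc skip ≠ [] ∨ (r ≤ (pvSeg skip (pvF^[t] check)).length ∧
          ∀ j : Nat, 1 ≤ j → j < t → pvAllowed skip (pvF^[j] check) = false)) := by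
      rcases hside with hseg | hcyc
      · cases hsc : pvSeg skip check with
        | nil => rw [hsc] at hseg; simp at hseg
        | cons w rest =>
          rw [hsc] at hseg
          simp only [List.length_cons] at hseg
          obtain ⟨p1, p2, p3, p4, p5⟩ := seg_first skip check h0 w rest hsc
          have hiter : pvF^[(w - check).toNat] check = w := by
            rw [iter_below (w - check).toNat check (by omega)]; omega
          refine ⟨(w - check).toNat, by omega, by omega, by rw [hiter]; exact p1, Or.inr ⟨?_, ?_⟩⟩
          · rw [hiter, ← p4]
            have : rest.length + 1 = (w :: rest).length := by simp
            omega
          · intro j hj1 hjt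
            have hij : pvF^[j] check = check + j := iter_below j check (by omega)
            rw [hij]
            exact p5 (check + j) (by omega) (by omega)
      · cases hcc : pvCyc skip with
        | nil => exact absurd hcc hcyc
        | cons w rest =>
          have hw : w ∈ pvCyc skip := by rw [hcc]; exact List.mem_cons_self
          unfold pvCyc at hw
          rw [List.mem_filter] at hw
          obtain ⟨hwr, hwa⟩ := hw
          rw [PySem.List.mem_pyRange_one] at hwr
          obtain ⟨t, ht1, ht2, ht3⟩ := reach check w h0 (by omega) (by omega)
          exact ⟨t, ht1, by omega, by rw [ht3]; exact hwa, Or.inl (by simp)⟩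
    obtain ⟨t, ht1, ht149, htall, hextra⟩ := key
    have hex : ∃ k : Nat, pvAllowed skip (pvF^[k + 1] check) = true :=
      ⟨t - 1, by rw [show t - 1 + 1 = t by omega]; exact htall⟩
    set d := Nat.find hex with hd
    have hdall : pvAllowed skip (pvF^[d + 1] check) = true := Nat.find_spec hex
    have hdmin : ∀ j : Nat, j < d → pvAllowed skip (pvF^[j + 1] check) = false := by
      intro j hj
      have := Nat.find_min hex hj
      simpa using this
    have hdle : d ≤ t - 1 := Nat.find_min' hex (by rw [show t - 1 + 1 = t by omega]; exact htall)
    have hfl : fuel = (fuel - (d + 1)) + (d + 1) := by omega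
    rw [hfl, adv skip d (fuel - (d + 1)) idx check acc hlt hdmin hdall]
    have hu0 : 0 ≤ pvF^[d] check := iter_nonneg d check h0
    have hvb : 0 ≤ pvF^[d + 1] check ∧ pvF^[d + 1] check ≤ 122 := by
      rw [Function.iterate_succ_apply']
      exact pvF_bounds _ hu0
    have chain : ∀ j : Nat, j ≤ d → ∀ m : Nat, 1 ≤ m →
        nthA skip (pvF^[j] check) m = nthA skip check m := by
      intro j
      induction j with
      | zero => intro _ m _; rfl
      | succ j ihj =>
        intro hj m hm
        have hsk : pvAllowed skip (pvF (pvF^[j] check)) = false := by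
          rw [← Function.iterate_succ_apply' pvF j check]
          exact hdmin j (by omega)
        rw [Function.iterate_succ_apply', nth_skip skip (pvF^[j] check) hsk m hm,
          ihj (by omega) m hm]
    have hdtake : pvAllowed skip (pvF (pvF^[d] check)) = true := by
      rw [← Function.iterate_succ_apply' pvF d check]
      exact hdall
    have hv1 : nthA skip check 1 = pvF^[d + 1] check := by
      have h1 := nth_take1 skip (pvF^[d] check) hdtake
      rw [chain d le_rfl 1 le_rfl] at h1
      rw [h1, ← Function.iterate_succ_apply' pvF d check]
    have hvm : ∀ m : Nat, 1 ≤ m → nthA skip (pvF^[d + 1] check) m = nthA skip check (m + 1) := by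
      intro m hm
      have h1 := nth_take skip (pvF^[d] check) hdtake m hm
      rw [chain d le_rfl (m + 1) (by omega)] at h1
      rw [Function.iterate_succ_apply' pvF d check]
      exact h1
    have hsideIH : r ≤ (pvSeg skip (pvF^[d + 1] check)).length ∨ pvCyc skip ≠ [] := by
      rcases hextra with hc | ⟨hs, hmin⟩
      · exact Or.inr hc
      · left
        have hdt : d = t - 1 := by
          by_contra hne
          have hlt2 : d + 1 < t := by omega
          have := hmin (d + 1) (by omega) hlt2
          rw [this] at hdall
          cases hdall
        rw [hdt, show t - 1 + 1 = t by omega]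
        exact hs
    rw [ih (pvF^[d + 1] check) (acc ++ [pvF^[d + 1] check]) (fuel - (d + 1)) (by omega)
      (by simp only [List.length_append, List.length_cons, List.length_nil]; push_cast at hidx ⊢; omega) hvb.1 (by omega) hsideIH]
    rw [List.range'_succ, List.map_cons, List.append_assoc, List.singleton_append]
    congr 1
    congr 1
    · exact hv1.symm
    · have hr2 : List.range' 2 r = (List.range' 1 r).map (fun x => 1 + x) := by
        rw [List.map_add_range']
      rw [hr2, List.map_map]
      apply List.map_congr_left
      intro m hmem
      have hm1 : 1 ≤ m := (List.mem_range'_1.mp hmem).1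
      simp only [Function.comp_apply]
      rw [hvm m hm1, Nat.add_comm]

-- A's per-character computation and B's per-character string, as named functions (each is
-- definitionally the corresponding port's loop body)
def aCharFn (skip : String) (index : Int) (i : Char) : Char :=
  Char.ofNat ((PySem.List.pyGet? (solutionWhile (200 * (index.toNat + 1)) index (pvSkipL skip) (i.toNat : Int) []).2 (index - 1)).getD 0).toNat

def bCharStr (skip : String) (index : Int) (ch : Char) : String :=
  let skipset := PySem.Set.ofList (skip.toList.map (fun i => (i.toNat : Int)))
  let cyc := (PySem.List.pyRange 97 123 1).filter (fun v => !(PySem.Set.contains skipset v))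
  let c := (ch.toNat : Int)
  let seg := (PySem.List.pyRange (c + 1) 123 1).filter (fun v => !(PySem.Set.contains skipset v))
  if index ≤ (seg.length : Int) then
    String.ofList [Char.ofNat ((PySem.List.pyGet? seg (index - 1)).getD 0).toNat]
  else
    String.ofList [Char.ofNat ((PySem.List.pyGet? cyc (PySem.Int.mod (index - (seg.length : Int) - 1) (cyc.length : Int))).getD 0).toNat]

lemma set_filter (skip : String) (l : List Int) :
    l.filter (fun v => !(PySem.Set.contains (PySem.Set.ofList (skip.toList.map (fun i => (i.toNat : Int)))) v))
      = l.filter (pvAllowed skip) := by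
  apply List.filter_congr
  intro v _
  by_cases hv : v ∈ pvSkipL skip
  · simp [pvAllowed, hv]
    exact List.mem_map.mp hv
  · simp [pvAllowed, hv]
    intro x hx e
    exact hv (List.mem_map.mpr ⟨x, hx, e⟩)

lemma a_char (skip : String) (index : Int) (c : Int) (h0 : 0 ≤ c) (h126 : c ≤ 126) (h1 : 1 ≤ index)
    (hside : index ≤ ((pvSeg skip c).length : Int) ∨ pvCyc skip ≠ []) :
    ((PySem.List.pyGet? (solutionWhile (200 * (index.toNat + 1)) index (pvSkipL skip) c []).2 (index - 1)).getD 0)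
      = nthA skip c index.toNat := by
  set r := index.toNat with hr
  have hside' : r ≤ (pvSeg skip c).length ∨ pvCyc skip ≠ [] := by
    rcases hside with hs | hc
    · left; omega
    · right; exact hc
  have hml := main_loop skip index r c [] (200 * (r + 1)) (by omega)
    (by simp only [List.length_nil]; omega) h0 h126 hside'
  rw [hml]
  simp only [List.nil_append]
  have hidx2 : index - 1 = ((r - 1 : Nat) : Int) := by omega
  rw [hidx2, PySem.List.pyGet?_natCast]
  have hlen : r - 1 < ((List.range' 1 r).map (nthA skip c)).length := by
    simp only [List.length_map, List.length_range']; omega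
  rw [List.getElem?_eq_getElem hlen]
  simp only [Option.getD_some, List.getElem_map, List.getElem_range']
  congr 1
  omega

lemma char_core (skip : String) (index : Int) (ch : Char) (hc : ch.toNat ≤ 126)
    (h1 : 1 ≤ index)
    (hside : index ≤ ((pvSeg skip (ch.toNat : Int)).length : Int) ∨ pvCyc skip ≠ []) :
    bCharStr skip index ch = String.ofList [aCharFn skip index ch] := by
  have ha : aCharFn skip index ch = Char.ofNat (nthA skip (ch.toNat : Int) index.toNat).toNat := by
    unfold aCharFn
    rw [a_char skip index _ (by omega) (by exact_mod_cast hc) h1 hside]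
  rw [ha]
  unfold bCharStr
  simp only [set_filter]
  set c := (ch.toNat : Int) with hcdef
  set r := index.toNat with hr
  have hsegE : (PySem.List.pyRange (c + 1) 123 1).filter (pvAllowed skip) = pvSeg skip c := rfl
  have hcycE : (PySem.List.pyRange 97 123 1).filter (pvAllowed skip) = pvCyc skip := rfl
  rw [hsegE, hcycE]
  by_cases hb : index ≤ ((pvSeg skip c).length : Int)
  · rw [if_pos hb]
    have hnth : nthA skip c r = (pvSeg skip c).getD (r - 1) 0 := by
      unfold nthA; rw [if_pos (by omega)]
    rw [hnth]
    have hidx2 : index - 1 = ((r - 1 : Nat) : Int) := by omega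
    rw [hidx2, PySem.List.pyGet?_natCast, List.getD_eq_getElem?_getD]
  · rw [if_neg hb]
    have hcyc : pvCyc skip ≠ [] := by
      rcases hside with hs | hcc
      · exact absurd hs hb
      · exact hcc
    have hL : 0 < ((pvCyc skip).length : Int) := by
      have := List.length_pos_iff.mpr hcyc
      omega
    have hnth : nthA skip c r
        = (pvCyc skip).getD ((r - (pvSeg skip c).length - 1) % (pvCyc skip).length) 0 := by
      unfold nthA; rw [if_neg (by omega)]
    rw [hnth]
    have ha2 : index - ((pvSeg skip c).length : Int) - 1
        = ((r - (pvSeg skip c).length - 1 : Nat) : Int) := by omega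
    rw [ha2, PySem.Int.mod_eq_emod_of_pos hL]
    rw [show (((r - (pvSeg skip c).length - 1 : Nat) : Int)) % (((pvCyc skip).length : Nat) : Int)
        = (((r - (pvSeg skip c).length - 1) % (pvCyc skip).length : Nat) : Int) by push_cast; ring_nf]
    rw [PySem.List.pyGet?_natCast, List.getD_eq_getElem?_getD]

lemma fold_push (g : Char → Char) : ∀ (l : List Char) (a : String),
    (List.foldl (fun ans i => ans ++ String.ofList [g i]) a l).toList = a.toList ++ l.map g := by
  intro l
  induction l with
  | nil => intro a; simp
  | cons x xs ih =>
    intro a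
    simp only [List.foldl_cons, List.map_cons, ih]
    simp

theorem solution_spec : Claim_equal_solution := by
  unfold Claim_equal_solution
  intro s skip index hdom hpre
  unfold Spec_solution
  have hdomS : ∀ ch ∈ s.toList, ch.toNat ≤ 126 := by
    intro ch hch
    unfold Dom_solution at hdom
    simp only [Bool.and_eq_true] at hdom
    have := hdom.1.1
    unfold pvDomStr at this
    rw [List.all_eq_true] at this
    have h2 := this ch hch
    unfold pvDomChar at h2
    simp only [Bool.or_eq_true, Bool.and_eq_true, decide_eq_true_eq, beq_iff_eq] at h2
    omega
  have hcore : ∀ ch ∈ s.toList, bCharStr skip index ch = String.ofList [aCharFn skip index ch] := by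
    intro ch hch
    rcases hpre with hs | ⟨h1, hside⟩
    · subst hs; simp at hch
    · refine char_core skip index ch (hdomS ch hch) h1 ?_
      rcases hside with hcyc | hall
      · exact Or.inr hcyc
      · exact Or.inl (hall ch hch)
  have eA : solution s skip index
      = s.toList.foldl (fun ans i => ans ++ String.ofList [aCharFn skip index i]) "" := rfl
  have eB : solution_alt s skip index = PySem.Str.join "" (s.toList.map (bCharStr skip index)) := rfl
  apply String.toList_inj.mp
  rw [eA, eB, fold_push]
  rw [PySem.Str.toList_join]
  rw [List.map_map]
  have : s.toList.map (String.toList ∘ bCharStr skip index)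
      = (s.toList.map (aCharFn skip index)).map (fun ch => [ch]) := by
    rw [List.map_map]
    apply List.map_congr_left
    intro ch hch
    simp only [Function.comp_apply]
    rw [hcore ch hch]
    simp
  rw [this]
  have hsep : ("" : String).toList = ([] : List Char) := rfl
  rw [hsep, PySem.Chars.join_nil_singletons]
  simp
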